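-- pv_equiv track=rewrite | github.com/ezeli/InSentiCap_ext | self_critical/utils.py | _array_to_str
-- ===== SOURCE A (Python) =====
-- def _array_to_str(arr, sos_token, eos_token):
--     arr = list(arr)
--     if arr[0] == sos_token:
--         arr = arr[1:]
--     out = ''
--     for i in range(len(arr)):
--         if arr[i] == eos_token:
--             break
--         out += str(arr[i]) + ' '
--     out += str(eos_token)
--     return out.strip()
-- ===== SOURCE B (Python) =====
-- def _array_to_str(arr, sos_token, eos_token):
--     arr = list(arr)
--     if arr[0] == sos_token:
--         arr = arr[1:]
--     if eos_token in arr: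
--         arr = arr[:arr.index(eos_token)]
--     return ' '.join(str(x) for x in arr + [eos_token]).strip()
-- ===== Notes on version B (the rewrite author's own statement) =====
-- stated objective: simpler
-- what changed: Replaces the incremental out += scan with break by locating the first eos via membership+index, slicing the list there, and building the whole string with one ' '.join over the kept tokens plus eos.
import Mathlib
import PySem

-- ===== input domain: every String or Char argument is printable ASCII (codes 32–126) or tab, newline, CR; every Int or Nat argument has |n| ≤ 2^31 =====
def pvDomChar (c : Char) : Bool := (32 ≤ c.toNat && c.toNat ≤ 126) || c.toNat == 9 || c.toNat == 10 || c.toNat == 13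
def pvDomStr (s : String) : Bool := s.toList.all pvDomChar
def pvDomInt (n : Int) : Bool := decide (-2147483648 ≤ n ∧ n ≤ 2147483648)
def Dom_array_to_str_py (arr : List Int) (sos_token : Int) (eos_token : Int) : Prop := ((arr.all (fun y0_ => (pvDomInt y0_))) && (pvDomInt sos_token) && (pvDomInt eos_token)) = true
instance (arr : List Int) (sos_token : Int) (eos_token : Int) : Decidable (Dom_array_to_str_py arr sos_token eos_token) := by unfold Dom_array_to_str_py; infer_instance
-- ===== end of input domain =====

-- B replaces A's incremental `out +=` scan with break by a membership+index slice at the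
-- first eos followed by one ' '.join; objective: simpler.

-- ===== PORT A =====
-- the `for i in range(len(arr)): if arr[i] == eos: break; out += str(arr[i]) + ' '` loop
def pvALoop (eos_token : Int) : List Int → String → String
  | [], out => out
  | x :: xs, out =>
    if x = eos_token then out
    else pvALoop eos_token xs (out ++ PySem.Int.toStr x ++ " ")

def array_to_str_py (arr : List Int) (sos_token : Int) (eos_token : Int) : String :=
  -- `if arr[0] == sos_token: arr = arr[1:]` (arr[0] raises IndexError on []; Pre_ excludes [])
  let arr1 := if PySem.List.pyGet? arr 0 = some sos_token then PySem.List.slice arr (some 1) none else arr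
  let out := pvALoop eos_token arr1 ""
  PySem.Str.strip (out ++ PySem.Int.toStr eos_token)

-- ===== PORT B =====
def array_to_str_py_alt (arr : List Int) (sos_token : Int) (eos_token : Int) : String :=
  let arr1 := if PySem.List.pyGet? arr 0 = some sos_token then PySem.List.slice arr (some 1) none else arr
  -- `if eos_token in arr: arr = arr[:arr.index(eos_token)]` — the `in` guard is the index? hit
  let arr2 := match PySem.List.index? arr1 eos_token with
    | some i => PySem.List.slice arr1 none (some (i : Int))
    | none => arr1
  PySem.Str.strip (PySem.Str.join " " ((arr2 ++ [eos_token]).map PySem.Int.toStr))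

-- ===== PRECONDITION & SPEC =====
-- A evaluates arr[0], which raises IndexError on the empty list.
def Pre_array_to_str_py (arr : List Int) (sos_token : Int) (eos_token : Int) : Prop := arr ≠ []
instance (arr : List Int) (sos_token : Int) (eos_token : Int) : Decidable (Pre_array_to_str_py arr sos_token eos_token) := by unfold Pre_array_to_str_py; infer_instance
def pvWitness_array_to_str_py : List Int × Int × Int := ([0, 5, 7, 9], 0, 9)

def Spec_array_to_str_py (arr : List Int) (sos_token : Int) (eos_token : Int) (out : String) : Prop := out = array_to_str_py_alt arr sos_token eos_token
instance (arr : List Int) (sos_token : Int) (eos_token : Int) (out : String) : Decidable (Spec_array_to_str_py arr sos_token eos_token out) := by unfold Spec_array_to_str_py; infer_instance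

-- ===== CLAIM (what is proved, stated in full; the proofs are below) =====
def Claim_equal_array_to_str_py : Prop := ∀ (arr : List Int) (sos_token : Int) (eos_token : Int), Dom_array_to_str_py arr sos_token eos_token → Pre_array_to_str_py arr sos_token eos_token → Spec_array_to_str_py arr sos_token eos_token (array_to_str_py arr sos_token eos_token)

-- ===== LEMMAS AND PROOFS =====

-- B's membership-guarded slice is the prefix before the first eos, i.e. takeWhile (≠ eos)
theorem pvSlice_eq_takeWhile (eos : Int) (xs : List Int) :
    (match PySem.List.index? xs eos with
      | some i => PySem.List.slice xs none (some (i : Int))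
      | none => xs) = xs.takeWhile (fun x => x ≠ eos) := by
  induction xs with
  | nil => rfl
  | cons x xs ih =>
    by_cases hx : x = eos
    · subst hx
      rw [PySem.List.index?_cons_self]
      simp [PySem.List.slice_to (x :: xs) (by norm_num : (0:Int) ≤ 0)]
    · rw [PySem.List.index?_cons_of_ne xs hx]
      cases h : PySem.List.index? xs eos with
      | none =>
        rw [h] at ih
        have ih' : xs = List.takeWhile (fun x => decide (x ≠ eos)) xs := by simpa using ih
        simp only [Option.map_none]
        rw [List.takeWhile_cons_of_pos (by simp [hx]), ← ih']
      | some i =>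
        rw [h] at ih
        have ih' : List.take i xs = List.takeWhile (fun x => decide (x ≠ eos)) xs := by
          simpa [PySem.List.slice_to_natCast xs i] using ih
        simp only [Option.map_some]
        rw [PySem.List.slice_to_natCast (x :: xs) (i + 1), List.take_succ_cons,
          List.takeWhile_cons_of_pos (by simp [hx]), ← ih']

-- ' '.join of a singleton and of a cons with nonempty tail, at the String level
theorem pvJoin_singleton (s : String) : PySem.Str.join " " [s] = s := by
  apply String.toList_inj.mp
  simp [PySem.Str.toList_join, PySem.Chars.join_singleton]

theorem pvJoin_cons (s : String) (rest : List String) (h : rest ≠ []) :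
    PySem.Str.join " " (s :: rest) = s ++ " " ++ PySem.Str.join " " rest := by
  cases rest with
  | nil => exact absurd rfl h
  | cons t ts =>
    apply String.toList_inj.mp
    simp [PySem.Str.toList_join, PySem.Chars.join_cons_cons]

-- A's accumulating loop, with eos appended, is the join over the takeWhile prefix plus eos
theorem pvLoop_join (eos : Int) (xs : List Int) (out : String) :
    pvALoop eos xs out ++ PySem.Int.toStr eos
      = out ++ PySem.Str.join " " ((xs.takeWhile (fun x => x ≠ eos) ++ [eos]).map PySem.Int.toStr) := by
  induction xs generalizing out with
  | nil => simp [pvALoop, pvJoin_singleton]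
  | cons x xs ih =>
    by_cases hx : x = eos
    · subst hx
      simp [pvALoop, pvJoin_singleton]
    · rw [show pvALoop eos (x :: xs) out = pvALoop eos xs (out ++ PySem.Int.toStr x ++ " ")
        from by simp [pvALoop, hx]]
      rw [ih, List.takeWhile_cons_of_pos (by simp [hx]), List.cons_append, List.map_cons]
      rw [pvJoin_cons _ _ (by simp)]
      simp [String.append_assoc]

-- ===== VERDICT (by name: the statement is the Claim_ definition above) =====
theorem array_to_str_py_spec : Claim_equal_array_to_str_py := by
  intro arr sos eos _ _
  unfold Spec_array_to_str_py array_to_str_py array_to_str_py_alt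
  simp only []
  rw [pvSlice_eq_takeWhile, pvLoop_join]
  simp
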